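-- pv_equiv track=rewrite | github.com/krishvadas/IRCTC-QuickBook | utils/station_search.py | filter_stations
-- ===== SOURCE A (Python) =====
-- def score_station_match(station, query):
--     query = query.lower()
--     sc = station.get("sc", "").lower()
--     name = station.get("en", "").lower()
--     cluster = station.get("ec", "").lower()
--
--     if query == sc:
--         return 3
--     elif sc.startswith(query) or name.startswith(query) or cluster.startswith(query):
--         return 2
--     elif query in sc or query in name or query in cluster:
--         return 1
--     return 0
--
-- def filter_stations(query, pool):
--     query = query.lower()
--     scored = []
--
--     for s in pool:
--         score = score_station_match(s, query)
--         if score > 0: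
--             scored.append((score, s))
--
--     best = {}
--     for score, station in scored:
--         sc = station.get("sc", "")
--         if sc and (sc not in best or score > best[sc][0]):
--             best[sc] = (score, station)
--
--     return [s for _, s in sorted(best.values(), key=lambda x: -x[0])]
-- ===== SOURCE B (Python) =====
-- def score_station_match(station, query):
--     query = query.lower()
--     sc = station.get("sc", "").lower()
--     en = station.get("en", "").lower()
--     ec = station.get("ec", "").lower()
--     if query == sc:
--         return 3
--     if any(f.startswith(query) for f in (sc, en, ec)):
--         return 2
--     if any(query in f for f in (sc, en, ec)):
--         return 1
--     return 0
--
--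
-- def filter_stations(query, pool):
--     query = query.lower()
--     # one fused pass: score each station and keep the best-scored station per code
--     best = {}
--     for s in pool:
--         score = score_station_match(s, query)
--         if score > 0:
--             sc = s.get("sc", "")
--             if sc and (sc not in best or score > best[sc][0]):
--                 best[sc] = (score, s)
--     # bucket distribution instead of a comparison sort (scores are only 3, 2, 1)
--     b3, b2, b1 = [], [], []
--     for score, station in best.values():
--         if score == 3:
--             b3.append(station)
--         elif score == 2:
--             b2.append(station)
--         else:
--             b1.append(station)
--     return b3 + b2 + b1
-- ===== Notes on version B (the rewrite author's own statement) =====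
-- stated objective: alternative
-- what changed: Fuses scoring and per-code dedup into one pass over the pool (no intermediate scored list) and replaces the comparison sort by a three-way bucket distribution over the only possible scores 3/2/1, concatenating buckets in insertion order to reproduce the stable sort.
import Mathlib
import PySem

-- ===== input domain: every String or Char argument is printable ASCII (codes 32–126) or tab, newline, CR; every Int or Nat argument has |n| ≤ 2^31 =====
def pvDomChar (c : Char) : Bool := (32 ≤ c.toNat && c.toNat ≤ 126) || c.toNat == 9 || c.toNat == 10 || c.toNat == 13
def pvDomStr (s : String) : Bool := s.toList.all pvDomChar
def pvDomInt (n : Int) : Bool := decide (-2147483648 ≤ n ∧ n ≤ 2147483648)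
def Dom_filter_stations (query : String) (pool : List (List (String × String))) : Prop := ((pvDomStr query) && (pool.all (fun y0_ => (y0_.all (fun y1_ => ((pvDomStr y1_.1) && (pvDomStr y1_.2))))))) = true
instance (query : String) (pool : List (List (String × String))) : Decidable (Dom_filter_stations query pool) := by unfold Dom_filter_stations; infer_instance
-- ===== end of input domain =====

-- B fuses scoring and per-code dedup into one pass and replaces the comparison
-- sort by a three-bucket distribution over the only possible scores 3/2/1
-- (objective: alternative decomposition, same results).

-- ===== PORT A =====
def score_station_match (station : List (String × String)) (query : String) : Int :=
  let query := PySem.Str.lower query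
  let sc := PySem.Str.lower (PySem.Dict.getD (PySem.Dict.mk station) "sc" "")
  let name := PySem.Str.lower (PySem.Dict.getD (PySem.Dict.mk station) "en" "")
  let cluster := PySem.Str.lower (PySem.Dict.getD (PySem.Dict.mk station) "ec" "")
  if query == sc then 3
  else if PySem.Str.startswith sc query || PySem.Str.startswith name query || PySem.Str.startswith cluster query then 2
  else if PySem.Str.isIn query sc || PySem.Str.isIn query name || PySem.Str.isIn query cluster then 1
  else 0

def filter_stations (query : String) (pool : List (List (String × String))) : List (List (String × String)) :=
  let query := PySem.Str.lower query
  let scored := pool.foldl (fun acc s =>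
    let score := score_station_match s query
    if score > 0 then acc ++ [(score, s)] else acc) ([] : List (Int × List (String × String)))
  let best := scored.foldl (fun best p =>
    let sc := PySem.Dict.getD (PySem.Dict.mk p.2) "sc" ""
    if !(sc == "") && (match PySem.Dict.get? best sc with
      | none => true
      | some v => decide (p.1 > v.1)) then PySem.Dict.insert best sc p else best)
    (PySem.Dict.empty : PySem.Dict String (Int × List (String × String)))
  (PySem.List.sorted (PySem.Dict.values best) (fun x => -x.1) false).map (fun x => x.2)

-- ===== PORT B =====
def score_station_match_alt (station : List (String × String)) (query : String) : Int :=
  let query := PySem.Str.lower query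
  let sc := PySem.Str.lower (PySem.Dict.getD (PySem.Dict.mk station) "sc" "")
  let en := PySem.Str.lower (PySem.Dict.getD (PySem.Dict.mk station) "en" "")
  let ec := PySem.Str.lower (PySem.Dict.getD (PySem.Dict.mk station) "ec" "")
  if query == sc then 3
  else if [sc, en, ec].any (fun f => PySem.Str.startswith f query) then 2
  else if [sc, en, ec].any (fun f => PySem.Str.isIn query f) then 1
  else 0

def filter_stations_alt (query : String) (pool : List (List (String × String))) : List (List (String × String)) :=
  let query := PySem.Str.lower query
  -- one fused pass: score each station and keep the best-scored station per code
  let best := pool.foldl (fun best s =>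
    let score := score_station_match_alt s query
    if score > 0 then
      let sc := PySem.Dict.getD (PySem.Dict.mk s) "sc" ""
      if !(sc == "") && (match PySem.Dict.get? best sc with
        | none => true
        | some v => decide (score > v.1)) then PySem.Dict.insert best sc (score, s) else best
    else best) (PySem.Dict.empty : PySem.Dict String (Int × List (String × String)))
  -- bucket distribution instead of a comparison sort (scores are only 3, 2, 1)
  let buckets := (PySem.Dict.values best).foldl
    (fun (b : List (List (String × String)) × List (List (String × String)) × List (List (String × String))) p =>
      if p.1 == 3 then (b.1 ++ [p.2], b.2.1, b.2.2)
      else if p.1 == 2 then (b.1, b.2.1 ++ [p.2], b.2.2)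
      else (b.1, b.2.1, b.2.2 ++ [p.2])) (([], [], []))
  buckets.1 ++ buckets.2.1 ++ buckets.2.2

-- ===== PRECONDITION & SPEC =====
def Spec_filter_stations (query : String) (pool : List (List (String × String))) (out : List (List (String × String))) : Prop := out = filter_stations_alt query pool
instance (query : String) (pool : List (List (String × String))) (out : List (List (String × String))) : Decidable (Spec_filter_stations query pool out) := by unfold Spec_filter_stations; infer_instance

-- ===== CLAIM (what is proved, stated in full; the proofs are below) =====
def Claim_equal_filter_stations : Prop := ∀ (query : String) (pool : List (List (String × String))), Dom_filter_stations query pool → Spec_filter_stations query pool (filter_stations query pool)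

-- ===== LEMMAS AND PROOFS =====

-- the two loop bodies, named (each is definitionally the body of its port's fold)
def pvStep1 (q : String) (acc : List (Int × List (String × String))) (s : List (String × String)) : List (Int × List (String × String)) :=
  if score_station_match s q > 0 then acc ++ [(score_station_match s q, s)] else acc

def pvStep2 (best : PySem.Dict String (Int × List (String × String))) (p : Int × List (String × String)) : PySem.Dict String (Int × List (String × String)) :=
  let sc := PySem.Dict.getD (PySem.Dict.mk p.2) "sc" ""
  if !(sc == "") && (match PySem.Dict.get? best sc with
    | none => true
    | some v => decide (p.1 > v.1)) then PySem.Dict.insert best sc p else best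

def pvFusedA (q : String) (d : PySem.Dict String (Int × List (String × String))) (s : List (String × String)) : PySem.Dict String (Int × List (String × String)) :=
  if score_station_match s q > 0 then pvStep2 d (score_station_match s q, s) else d

def pvFusedB (q : String) (d : PySem.Dict String (Int × List (String × String))) (s : List (String × String)) : PySem.Dict String (Int × List (String × String)) :=
  if score_station_match_alt s q > 0 then pvStep2 d (score_station_match_alt s q, s) else d

def pvBucket (b : List (List (String × String)) × List (List (String × String)) × List (List (String × String))) (p : Int × List (String × String)) : List (List (String × String)) × List (List (String × String)) × List (List (String × String)) :=
  if p.1 == 3 then (b.1 ++ [p.2], b.2.1, b.2.2)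
  else if p.1 == 2 then (b.1, b.2.1 ++ [p.2], b.2.2)
  else (b.1, b.2.1, b.2.2 ++ [p.2])

lemma pv_scorer_eq (s : List (String × String)) (q : String) :
    score_station_match s q = score_station_match_alt s q := by
  simp [score_station_match, score_station_match_alt, Bool.or_assoc]

lemma pv_scorer_cases (s : List (String × String)) (q : String) :
    score_station_match_alt s q = 0 ∨ score_station_match_alt s q = 1 ∨
    score_station_match_alt s q = 2 ∨ score_station_match_alt s q = 3 := by
  unfold score_station_match_alt
  dsimp only
  split_ifs <;> simp

lemma pv_fuse (q : String) (l : List (List (String × String)))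
    (acc : List (Int × List (String × String))) (init : PySem.Dict String (Int × List (String × String))) :
    (l.foldl (pvStep1 q) acc).foldl pvStep2 init = l.foldl (pvFusedA q) (acc.foldl pvStep2 init) := by
  induction l generalizing acc init with
  | nil => rfl
  | cons x t ih =>
    simp only [List.foldl_cons, ih]
    congr 1
    unfold pvStep1 pvFusedA
    by_cases h : score_station_match x q > 0
    · simp [h, List.foldl_append]
    · simp [h]

lemma pv_fusedA_eq_fusedB (q : String) : pvFusedA q = pvFusedB q := by
  funext d s
  unfold pvFusedA pvFusedB
  rw [pv_scorer_eq]

lemma pv_values_inv (q : String) (l : List (List (String × String)))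
    (d : PySem.Dict String (Int × List (String × String)))
    (hd : ∀ p ∈ PySem.Dict.values d, p.1 = 1 ∨ p.1 = 2 ∨ p.1 = 3) :
    ∀ p ∈ PySem.Dict.values (l.foldl (pvFusedB q) d), p.1 = 1 ∨ p.1 = 2 ∨ p.1 = 3 := by
  induction l generalizing d with
  | nil => exact hd
  | cons s t ih =>
    simp only [List.foldl_cons]
    apply ih
    intro p hp
    unfold pvFusedB at hp
    by_cases h : score_station_match_alt s q > 0
    · simp only [h, if_pos] at hp
      unfold pvStep2 at hp
      dsimp only at hp
      split at hp <;> split at hp <;>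
        first
        | exact hd p hp
        | (rcases PySem.Dict.mem_values_insert _ _ _ _ hp with h1 | h1
           · subst h1
             rcases pv_scorer_cases s q with h2 | h2 | h2 | h2 <;> simp_all
           · exact hd p h1)
    · simp only [h, if_false] at hp
      exact hd p hp

lemma pv_bucket_fold (l : List (Int × List (String × String)))
    (x y z : List (List (String × String))) :
    l.foldl pvBucket (x, y, z) =
      (x ++ (l.filter (fun p => p.1 == 3)).map (fun p => p.2),
       y ++ (l.filter (fun p => !(p.1 == 3) && p.1 == 2)).map (fun p => p.2),
       z ++ (l.filter (fun p => !(p.1 == 3) && !(p.1 == 2))).map (fun p => p.2)) := by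
  induction l generalizing x y z with
  | nil => simp
  | cons p t ih =>
    simp only [List.foldl_cons]
    by_cases h3 : p.1 = 3
    · simp [pvBucket, h3, ih, List.append_assoc]
    · by_cases h2 : p.1 = 2
      · simp [pvBucket, h2, ih, List.append_assoc]
      · simp [pvBucket, h3, h2, ih, List.append_assoc]

-- insertion goes past a block the new element does not sort before
lemma pv_insertBy_append_left {α : Type} (bef : α → α → Bool) (x : α) (l1 l2 : List α)
    (h : ∀ y ∈ l1, bef x y = false) :
    PySem.List.insertBy bef x (l1 ++ l2) = l1 ++ PySem.List.insertBy bef x l2 := by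
  induction l1 with
  | nil => rfl
  | cons y ys ih =>
    simp only [List.cons_append, PySem.List.insertBy, h y (by simp)]
    simp only [Bool.false_eq_true, if_false, List.cons.injEq, true_and]
    exact ih (fun y hy => h y (by simp [hy]))

-- insertion lands at the front of a block it sorts before
lemma pv_insertBy_all_before {α : Type} (bef : α → α → Bool) (x : α) (l : List α)
    (h : ∀ y ∈ l, bef x y = true) :
    PySem.List.insertBy bef x l = x :: l := by
  cases l with
  | nil => rfl
  | cons y ys => simp [PySem.List.insertBy, h y (by simp)]

def pvBef {α : Type} (a b : Int × α) : Bool := decide ((-a.1 : Int) < -b.1)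

lemma pv_insertBy_all_false {α : Type} (bef : α → α → Bool) (x : α) (l : List α)
    (h : ∀ y ∈ l, bef x y = false) :
    PySem.List.insertBy bef x l = l ++ [x] := by
  have := pv_insertBy_append_left bef x l [] h
  simpa using this

lemma pv_insert_fold_buckets {α : Type} (l : List (Int × α))
    (hl : ∀ p ∈ l, p.1 = 1 ∨ p.1 = 2 ∨ p.1 = 3)
    (a3 a2 a1 : List (Int × α))
    (h3 : ∀ p ∈ a3, p.1 = 3) (h2 : ∀ p ∈ a2, p.1 = 2) (h1 : ∀ p ∈ a1, p.1 = 1) :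
    l.foldl (fun acc x => PySem.List.insertBy pvBef x acc) (a3 ++ a2 ++ a1) =
      (a3 ++ l.filter (fun p => p.1 == 3)) ++ (a2 ++ l.filter (fun p => p.1 == 2)) ++
        (a1 ++ l.filter (fun p => p.1 == 1)) := by
  induction l generalizing a3 a2 a1 with
  | nil => simp
  | cons x t ih =>
    have hlt : ∀ p ∈ t, p.1 = 1 ∨ p.1 = 2 ∨ p.1 = 3 := fun p hp => hl p (by simp [hp])
    simp only [List.foldl_cons]
    rcases hl x (by simp) with hx | hx | hx
    · -- score 1: x lands at the very end
      have hb3 : ∀ y ∈ a3, pvBef x y = false := fun y hy => by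
        simp only [pvBef, hx, h3 y hy]; decide
      have hb2 : ∀ y ∈ a2, pvBef x y = false := fun y hy => by
        simp only [pvBef, hx, h2 y hy]; decide
      have hb1 : ∀ y ∈ a1, pvBef x y = false := fun y hy => by
        simp only [pvBef, hx, h1 y hy]; decide
      have e : PySem.List.insertBy pvBef x (a3 ++ a2 ++ a1) = a3 ++ a2 ++ (a1 ++ [x]) := by
        rw [List.append_assoc, pv_insertBy_append_left pvBef x a3 (a2 ++ a1) hb3,
            pv_insertBy_append_left pvBef x a2 a1 hb2, pv_insertBy_all_false pvBef x a1 hb1]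
        simp [List.append_assoc]
      have h1' : ∀ p ∈ a1 ++ [x], p.1 = 1 := by
        intro p hp
        rcases List.mem_append.mp hp with hp | hp
        · exact h1 p hp
        · simp at hp; subst hp; exact hx
      rw [e, ih hlt a3 a2 (a1 ++ [x]) h3 h2 h1']
      simp [hx, List.append_assoc]
    · -- score 2: x lands between the 2s and the 1s
      have hb3 : ∀ y ∈ a3, pvBef x y = false := fun y hy => by
        simp only [pvBef, hx, h3 y hy]; decide
      have hb2 : ∀ y ∈ a2, pvBef x y = false := fun y hy => by
        simp only [pvBef, hx, h2 y hy]; decide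
      have hb1 : ∀ y ∈ a1, pvBef x y = true := fun y hy => by
        simp only [pvBef, hx, h1 y hy]; decide
      have e : PySem.List.insertBy pvBef x (a3 ++ a2 ++ a1) = a3 ++ (a2 ++ [x]) ++ a1 := by
        rw [List.append_assoc, pv_insertBy_append_left pvBef x a3 (a2 ++ a1) hb3,
            pv_insertBy_append_left pvBef x a2 a1 hb2, pv_insertBy_all_before pvBef x a1 hb1]
        simp [List.append_assoc]
      have h2' : ∀ p ∈ a2 ++ [x], p.1 = 2 := by
        intro p hp
        rcases List.mem_append.mp hp with hp | hp
        · exact h2 p hp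
        · simp at hp; subst hp; exact hx
      rw [e, ih hlt a3 (a2 ++ [x]) a1 h3 h2' h1]
      simp [hx, List.append_assoc]
    · -- score 3: x lands right after the 3s
      have hb3 : ∀ y ∈ a3, pvBef x y = false := fun y hy => by
        simp only [pvBef, hx, h3 y hy]; decide
      have hb21 : ∀ y ∈ a2 ++ a1, pvBef x y = true := by
        intro y hy
        rcases List.mem_append.mp hy with hy | hy
        · simp only [pvBef, hx, h2 y hy]; decide
        · simp only [pvBef, hx, h1 y hy]; decide
      have e : PySem.List.insertBy pvBef x (a3 ++ a2 ++ a1) = (a3 ++ [x]) ++ a2 ++ a1 := by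
        rw [List.append_assoc, pv_insertBy_append_left pvBef x a3 (a2 ++ a1) hb3,
            pv_insertBy_all_before pvBef x (a2 ++ a1) hb21]
        simp [List.append_assoc]
      have h3' : ∀ p ∈ a3 ++ [x], p.1 = 3 := by
        intro p hp
        rcases List.mem_append.mp hp with hp | hp
        · exact h3 p hp
        · simp at hp; subst hp; exact hx
      rw [e, ih hlt (a3 ++ [x]) a2 a1 h3' h2 h1]
      simp [hx, List.append_assoc]

lemma pv_sorted_buckets {α : Type} (l : List (Int × α))
    (hl : ∀ p ∈ l, p.1 = 1 ∨ p.1 = 2 ∨ p.1 = 3) :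
    PySem.List.sorted l (fun x => -x.1) false =
      l.filter (fun p => p.1 == 3) ++ l.filter (fun p => p.1 == 2) ++ l.filter (fun p => p.1 == 1) := by
  have h0 : PySem.List.sorted l (fun x : Int × α => -x.1) false =
      l.foldl (fun acc x => PySem.List.insertBy pvBef x acc) (([] : List (Int × α)) ++ [] ++ []) := rfl
  rw [h0, pv_insert_fold_buckets l hl [] [] [] (by simp) (by simp) (by simp)]
  simp

-- ===== VERDICT (by name: the statement is the Claim_ definition above) =====
lemma pv_portA_eq (query : String) (pool : List (List (String × String))) :
    filter_stations query pool =
      (PySem.List.sorted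
        (PySem.Dict.values ((pool.foldl (pvStep1 (PySem.Str.lower query)) []).foldl pvStep2 PySem.Dict.empty))
        (fun x => -x.1) false).map (fun x => x.2) := rfl

set_option maxHeartbeats 1000000 in
lemma pv_portB_eq (query : String) (pool : List (List (String × String))) :
    filter_stations_alt query pool =
      (let b := (PySem.Dict.values (pool.foldl (pvFusedB (PySem.Str.lower query)) PySem.Dict.empty)).foldl pvBucket ([], [], []);
       b.1 ++ b.2.1 ++ b.2.2) := rfl

-- ===== VERDICT (by name: the statement is the Claim_ definition above) =====
theorem filter_stations_spec : Claim_equal_filter_stations := by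
  intro query pool _
  unfold Spec_filter_stations
  rw [pv_portA_eq, pv_portB_eq, pv_fuse, pv_fusedA_eq_fusedB]
  simp only [List.foldl_nil]
  have hinv : ∀ p ∈ PySem.Dict.values
      (pool.foldl (pvFusedB (PySem.Str.lower query)) PySem.Dict.empty),
      p.1 = 1 ∨ p.1 = 2 ∨ p.1 = 3 := by
    apply pv_values_inv
    intro p hp
    simp [PySem.Dict.values, PySem.Dict.empty] at hp
  set l := PySem.Dict.values (pool.foldl (pvFusedB (PySem.Str.lower query)) PySem.Dict.empty) with hl
  rw [pv_sorted_buckets l hinv, pv_bucket_fold]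
  simp only [List.nil_append, List.map_append]
  congr 1
  · congr 1
    refine congrArg _ (List.filter_congr ?_)
    intro p _
    by_cases h : p.1 = 2 <;> simp [h]
  · refine congrArg _ (List.filter_congr ?_)
    intro p hp
    rcases hinv p hp with h | h | h <;> simp [h]
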